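-- pv_equiv track=rewrite | github.com/Devansh3712/reenactify | knowledge_graph.py | _create_edge
-- ===== SOURCE A (Python) =====
-- def _create_edge(head: str, tail: str, text: str) -> dict:
--     # Add line breaks to text
--     text_list = text.split(" ")
--     for i in range(len(text_list)):
--         if i > 0 and i % 5 == 0:
--             text_list[i] = "<br>" + text_list[i]
--     text = " ".join(text_list)
--     return {
--         "arrows": "to",
--         "from": head,
--         "to": tail,
--         "title": text,
--     }
-- ===== SOURCE B (Python) =====
-- def _create_edge(head: str, tail: str, text: str) -> dict:
--     # chunk-then-join: group the words in runs of five, join the runs with " <br>"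
--     words = text.split(" ")
--     lines = []
--     while words:
--         lines.append(" ".join(words[:5]))
--         words = words[5:]
--     return {
--         "arrows": "to",
--         "from": head,
--         "to": tail,
--         "title": " <br>".join(lines),
--     }
-- ===== Notes on version B (the rewrite author's own statement) =====
-- stated objective: simpler
-- what changed: Replaces A's index loop that tests i%5 and mutates the word list in place with a chunk-then-join decomposition: slice the words into runs of five, join each run with " " and join the runs with " <br>".
import Mathlib
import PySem

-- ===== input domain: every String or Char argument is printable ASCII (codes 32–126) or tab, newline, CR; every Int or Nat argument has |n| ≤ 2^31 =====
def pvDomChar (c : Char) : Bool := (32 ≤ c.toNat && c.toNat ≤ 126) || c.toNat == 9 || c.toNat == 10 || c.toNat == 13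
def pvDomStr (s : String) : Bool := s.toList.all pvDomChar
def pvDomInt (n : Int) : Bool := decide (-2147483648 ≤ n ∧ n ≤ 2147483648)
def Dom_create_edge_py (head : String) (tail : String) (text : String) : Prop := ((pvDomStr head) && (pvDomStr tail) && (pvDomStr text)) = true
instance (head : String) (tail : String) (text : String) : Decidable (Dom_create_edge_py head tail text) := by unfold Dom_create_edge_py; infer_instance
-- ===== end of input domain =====

-- B replaces A's per-index modulo-and-mutate loop by chunking the word list into runs
-- of five and joining the runs with " <br>" (objective: simpler); same return value.

-- ===== PORT A =====
-- loop body of A's `for i in range(len(text_list)): if i > 0 and i % 5 == 0: text_list[i] = "<br>" + text_list[i]`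
def aStep (acc : List String) (i : Int) : List String :=
  if 0 < i ∧ PySem.Int.mod i 5 = 0 then
    PySem.List.pySetD acc i ("<br>" ++ PySem.List.pyGetD acc i "")
  else acc

def create_edge_py (head : String) (tail : String) (text : String) : List (String × String) :=
  -- text.split(" "): sep is non-empty, so split? never returns none; getD's default is never used
  let text_list := (PySem.Str.split? text " ").getD []
  let text_list := (PySem.List.pyRange 0 (text_list.length : Int)).foldl aStep text_list
  let text := PySem.Str.join " " text_list
  [("arrows", "to"), ("from", head), ("to", tail), ("title", text)]

-- ===== PORT B =====
-- B's `while words: lines.append(" ".join(words[:5])); words = words[5:]`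
def chunkLines (words : List String) : List String :=
  match words with
  | [] => []
  | w :: rest =>
    PySem.Str.join " " (PySem.List.slice (w :: rest) none (some 5)) ::
      chunkLines (PySem.List.slice (w :: rest) (some 5) none)
termination_by words.length
decreasing_by
  simp only [show (5 : Int) = ((5 : Nat) : Int) by norm_num, PySem.List.slice_from_natCast,
    List.length_drop, List.length_cons]
  omega

def create_edge_py_alt (head : String) (tail : String) (text : String) : List (String × String) :=
  -- text.split(" "): sep is non-empty, so split? never returns none; getD's default is never used
  let words := (PySem.Str.split? text " ").getD []
  let lines := chunkLines words
  [("arrows", "to"), ("from", head), ("to", tail), ("title", PySem.Str.join " <br>" lines)]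

-- ===== PRECONDITION & SPEC =====
def Spec_create_edge_py (head : String) (tail : String) (text : String) (out : List (String × String)) : Prop := out = create_edge_py_alt head tail text
instance (head : String) (tail : String) (text : String) (out : List (String × String)) : Decidable (Spec_create_edge_py head tail text out) := by unfold Spec_create_edge_py; infer_instance

-- ===== CLAIM (what is proved, stated in full; the proofs are below) =====
def Claim_equal_create_edge_py : Prop := ∀ (head : String) (tail : String) (text : String), Dom_create_edge_py head tail text → Spec_create_edge_py head tail text (create_edge_py head tail text)

-- ===== LEMMAS AND PROOFS =====

-- what A's loop produces from position k on: every positive multiple-of-5 index gets "<br>" prepended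
def brMark (k : Nat) : List String → List String
  | [] => []
  | w :: rest => (if 0 < k ∧ k % 5 = 0 then "<br>" ++ w else w) :: brMark (k + 1) rest

-- the same marking at the List-Char level
def brMarkC (k : Nat) : List (List Char) → List (List Char)
  | [] => []
  | w :: rest => (if 0 < k ∧ k % 5 = 0 then "<br>".toList ++ w else w) :: brMarkC (k + 1) rest

-- chunkLines at the List-Char level
def chunkC (ws : List (List Char)) : List (List Char) :=
  match ws with
  | [] => []
  | w :: rest =>
    PySem.Chars.join " ".toList (List.take 5 (w :: rest)) :: chunkC (List.drop 5 (w :: rest))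
termination_by ws.length
decreasing_by simp

theorem chunkC_nil : chunkC [] = [] := by rw [chunkC]

theorem chunkC_cons (w : List Char) (rest : List (List Char)) :
    chunkC (w :: rest) =
      PySem.Chars.join " ".toList (List.take 5 (w :: rest)) :: chunkC (List.drop 5 (w :: rest)) := by
  rw [chunkC]

theorem getD_at_len {α : Type} (pre : List α) (w : α) (rest : List α) (d : α) :
    (pre ++ w :: rest).getD pre.length d = w := by
  induction pre with
  | nil => rfl
  | cons a l ih => simpa using ih

theorem set_at_len {α : Type} (pre : List α) (w v : α) (rest : List α) :
    (pre ++ w :: rest).set pre.length v = pre ++ v :: rest := by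
  induction pre with
  | nil => rfl
  | cons a l ih => simpa using ih

theorem mod5_cast (m : Nat) : PySem.Int.mod (m : Int) 5 = ((m % 5 : Nat) : Int) := by
  rw [show (5 : Int) = ((5 : Nat) : Int) by norm_num, PySem.Int.mod_natCast]

theorem loopA_go : ∀ (post pre : List String),
    List.foldl aStep (pre ++ post)
        (PySem.List.pyRange (pre.length : Int) (((pre.length + post.length : Nat)) : Int)) =
      pre ++ brMark pre.length post := by
  intro post
  induction post with
  | nil =>
      intro pre
      simp [PySem.List.pyRange, brMark]
  | cons w rest ih =>
      intro pre
      have hlt : (pre.length : Int) < ((pre.length + (w :: rest).length : Nat) : Int) := by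
        simp only [List.length_cons]; push_cast; omega
      rw [PySem.List.pyRange_one_cons hlt, List.foldl_cons]
      have hstep : aStep (pre ++ w :: rest) (pre.length : Int) =
          pre ++ (if 0 < pre.length ∧ pre.length % 5 = 0 then "<br>" ++ w else w) :: rest := by
        unfold aStep
        by_cases h : 0 < pre.length ∧ pre.length % 5 = 0
        · rw [if_pos ⟨by exact_mod_cast h.1, by rw [mod5_cast]; exact_mod_cast h.2⟩, if_pos h,
            PySem.List.pySetD_natCast, PySem.List.pyGetD_natCast, getD_at_len, set_at_len]
        · rw [if_neg, if_neg h]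
          intro hc
          apply h
          refine ⟨by exact_mod_cast hc.1, ?_⟩
          have := hc.2
          rw [mod5_cast] at this
          exact_mod_cast this
      rw [hstep]
      set w' := (if 0 < pre.length ∧ pre.length % 5 = 0 then "<br>" ++ w else w) with hw'
      have h1 : pre ++ w' :: rest = (pre ++ [w']) ++ rest := by simp
      have h2 : ((pre.length + (w :: rest).length : Nat) : Int) =
          (((pre ++ [w']).length + rest.length : Nat) : Int) := by simp; omega
      have h3 : ((pre.length : Int) + 1) = ((pre ++ [w']).length : Int) := by push_cast; simp
      rw [h1, h2, h3, ih (pre ++ [w'])]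
      have h4 : (pre ++ [w']).length = pre.length + 1 := by simp
      rw [h4]
      simp only [brMark, List.append_assoc, List.singleton_append]
      rw [← hw']

theorem brMarkC_bump : ∀ (rest : List (List Char)) (k : Nat), 0 < k →
    brMarkC (k + 5) rest = brMarkC k rest := by
  intro rest
  induction rest with
  | nil => intro k hk; rfl
  | cons w t ih =>
      intro k hk
      simp only [brMarkC]
      rw [show k + 5 + 1 = (k + 1) + 5 by omega, ih (k + 1) (by omega)]
      congr 1
      split_ifs with h1 h2 <;> first | rfl | (exfalso; omega)

theorem join_cons_append (sep x y : List Char) (m : List (List Char)) :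
    PySem.Chars.join sep ((x ++ y) :: m) = x ++ PySem.Chars.join sep (y :: m) := by
  cases m with
  | nil => rw [PySem.Chars.join_singleton, PySem.Chars.join_singleton]
  | cons q r =>
      rw [PySem.Chars.join_cons_cons, PySem.Chars.join_cons_cons]
      simp [List.append_assoc]

theorem brMarkC_small (k : Nat) (hk : ¬ (0 < k ∧ k % 5 = 0)) (w : List Char)
    (rest : List (List Char)) : brMarkC k (w :: rest) = w :: brMarkC (k + 1) rest := by
  simp [brMarkC, hk]

-- core: marking every fifth word equals chunking into fives and joining with " <br>"
theorem core : ∀ (n : Nat) (ws : List (List Char)), ws.length ≤ n →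
    PySem.Chars.join " ".toList (brMarkC 0 ws) = PySem.Chars.join " <br>".toList (chunkC ws) := by
  intro n
  induction n with
  | zero =>
      intro ws h
      have hw : ws = [] := by cases ws <;> simp_all
      subst hw
      rw [chunkC_nil]
      rfl
  | succ n ih =>
      intro ws h
      match ws with
      | [] =>
          rw [chunkC_nil]
          rfl
      | [a] =>
          simp [brMarkC, chunkC_cons, chunkC_nil, PySem.Chars.join_singleton]
      | [a, b] =>
          simp [brMarkC, chunkC_cons, chunkC_nil, PySem.Chars.join_singleton]
      | [a, b, c] =>
          simp [brMarkC, chunkC_cons, chunkC_nil, PySem.Chars.join_singleton]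
      | [a, b, c, d] =>
          simp [brMarkC, chunkC_cons, chunkC_nil, PySem.Chars.join_singleton]
      | [a, b, c, d, e] =>
          simp [brMarkC, chunkC_cons, chunkC_nil, PySem.Chars.join_singleton]
      | a :: b :: c :: d :: e :: r :: rt =>
          have hr : brMarkC 0 (r :: rt) = r :: brMarkC 1 rt := brMarkC_small 0 (by omega) r rt
          have hexp : brMarkC 0 (a :: b :: c :: d :: e :: r :: rt) =
              a :: b :: c :: d :: e :: ("<br>".toList ++ r) :: brMarkC 1 rt := by
            rw [brMarkC_small 0 (by omega), brMarkC_small 1 (by omega),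
              brMarkC_small 2 (by omega), brMarkC_small 3 (by omega),
              brMarkC_small 4 (by omega)]
            have h5 : brMarkC 5 (r :: rt) = ("<br>".toList ++ r) :: brMarkC 6 rt := by
              simp [brMarkC]
            rw [h5, show (6 : Nat) = 1 + 5 by omega, brMarkC_bump rt 1 (by omega)]
          have hih : PySem.Chars.join " ".toList (brMarkC 0 (r :: rt)) =
              PySem.Chars.join " <br>".toList (chunkC (r :: rt)) := by
            apply ih
            simp at h ⊢
            omega
          rw [hexp]
          rw [PySem.Chars.join_cons_cons " ".toList a, PySem.Chars.join_cons_cons " ".toList b,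
            PySem.Chars.join_cons_cons " ".toList c, PySem.Chars.join_cons_cons " ".toList d,
            PySem.Chars.join_cons_cons " ".toList e, join_cons_append " ".toList]
          rw [← hr, hih]
          -- now expand the right-hand side once
          rw [chunkC_cons a]
          simp only [List.take_succ_cons, List.take_zero, List.drop_succ_cons, List.drop_zero]
          rw [chunkC_cons r rt, PySem.Chars.join_cons_cons " <br>".toList, ← chunkC_cons r rt]
          rw [PySem.Chars.join_cons_cons " ".toList a, PySem.Chars.join_cons_cons " ".toList b,
            PySem.Chars.join_cons_cons " ".toList c, PySem.Chars.join_cons_cons " ".toList d,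
            PySem.Chars.join_singleton]
          have hsep : (" <br>".toList : List Char) = " ".toList ++ "<br>".toList := by decide
          rw [hsep]
          simp [List.append_assoc]

theorem toList_brMark : ∀ (ws : List String) (k : Nat),
    (brMark k ws).map String.toList = brMarkC k (ws.map String.toList) := by
  intro ws
  induction ws with
  | nil => intro k; rfl
  | cons w rest ih =>
      intro k
      simp only [brMark, brMarkC, List.map_cons, ih (k + 1)]
      congr 1
      split_ifs <;> simp

theorem slice_to_5 {α : Type} (xs : List α) :
    PySem.List.slice xs none (some 5) = List.take 5 xs := by
  rw [show (5 : Int) = ((5 : Nat) : Int) by norm_num, PySem.List.slice_to_natCast]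

theorem slice_from_5 {α : Type} (xs : List α) :
    PySem.List.slice xs (some 5) none = List.drop 5 xs := by
  rw [show (5 : Int) = ((5 : Nat) : Int) by norm_num, PySem.List.slice_from_natCast]

theorem toList_chunkLines : ∀ (n : Nat) (ws : List String), ws.length ≤ n →
    (chunkLines ws).map String.toList = chunkC (ws.map String.toList) := by
  intro n
  induction n with
  | zero =>
      intro ws h
      have hw : ws = [] := by cases ws <;> simp_all
      subst hw
      rw [chunkLines]
      simp [chunkC_nil]
  | succ n ih =>
      intro ws h
      match ws with
      | [] =>
          rw [chunkLines]
          simp [chunkC_nil]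
      | w :: rest =>
          rw [chunkLines]
          simp only [List.map_cons]
          rw [chunkC_cons, slice_to_5, slice_from_5]
          have hlen : (List.drop 5 (w :: rest)).length ≤ n := by
            simp at h ⊢
            omega
          congr 1
          · rw [PySem.Str.toList_join]
            congr 1
            simp [List.map_take]
          · rw [ih _ hlen]
            congr 1
            simp [List.map_drop]

theorem title_eq (ws : List String) :
    PySem.Str.join " " ((PySem.List.pyRange 0 (ws.length : Int)).foldl aStep ws) =
      PySem.Str.join " <br>" (chunkLines ws) := by
  have hloop := loopA_go ws []
  simp only [List.nil_append, List.length_nil, Nat.zero_add, Nat.cast_zero] at hloop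
  rw [hloop]
  unfold PySem.Str.join
  congr 1
  rw [toList_brMark, toList_chunkLines ws.length ws (le_refl _)]
  exact core (ws.map String.toList).length (ws.map String.toList) (le_refl _)

-- ===== VERDICT (by name: the statement is the Claim_ definition above) =====
theorem create_edge_py_spec : Claim_equal_create_edge_py := by
  intro head tail text _
  unfold Spec_create_edge_py create_edge_py create_edge_py_alt
  simp only [List.cons.injEq, Prod.mk.injEq, and_true, true_and]
  exact title_eq _
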